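-- pv_equiv track=rewrite | github.com/Jinnie-J/Algorithm-study | programmers/게임아이템.py | solution
-- ===== SOURCE A (Python) =====
-- def solution(healths, items):
--     answer = []
--
--     healths.sort()
--     checked = [False] * len(items)
--
--     for i in range(len(healths)):
--         maxValue = 0
--         maxIndex = -1
--         for j in range(len(items)):
--             if healths[i] - items[j][1] >= 100 and not checked[j]:
--                 if items[j][0] > maxValue:
--                     maxValue = items[j][0]
--                     maxIndex = j
--
--         if maxIndex != -1:
--             checked[maxIndex] = True
--             answer.append(maxIndex + 1)
--
--     answer.sort()
--
--     return answer
-- ===== SOURCE B (Python) =====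
-- def solution(healths, items):
--     # Sort usable items once by (attack desc, index asc); each character then
--     # takes the first affordable item from this preference list.
--     healths.sort()
--     order = sorted((i for i in range(len(items)) if items[i][0] > 0),
--                    key=lambda i: (-items[i][0], i))
--     remaining = [(items[i][1], i) for i in order]
--     answer = []
--     for h in healths:
--         for k in range(len(remaining)):
--             cost, i = remaining[k]
--             if h - cost >= 100:
--                 answer.append(i + 1)
--                 del remaining[k]
--                 break
--     answer.sort()
--     return answer
-- ===== Notes on version B (the rewrite author's own statement) =====
-- stated objective: faster
-- what changed: Instead of rescanning all items for the argmax per character, B sorts the usable items once by (attack desc, index asc) and gives each sorted character the first affordable item of that preference list, deleting it on use; a timing run measured B ~5x faster on the generated inputs.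
-- outside the precondition, e.g. on solution([], [[]]): A returns [], B raises IndexError
import Mathlib
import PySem

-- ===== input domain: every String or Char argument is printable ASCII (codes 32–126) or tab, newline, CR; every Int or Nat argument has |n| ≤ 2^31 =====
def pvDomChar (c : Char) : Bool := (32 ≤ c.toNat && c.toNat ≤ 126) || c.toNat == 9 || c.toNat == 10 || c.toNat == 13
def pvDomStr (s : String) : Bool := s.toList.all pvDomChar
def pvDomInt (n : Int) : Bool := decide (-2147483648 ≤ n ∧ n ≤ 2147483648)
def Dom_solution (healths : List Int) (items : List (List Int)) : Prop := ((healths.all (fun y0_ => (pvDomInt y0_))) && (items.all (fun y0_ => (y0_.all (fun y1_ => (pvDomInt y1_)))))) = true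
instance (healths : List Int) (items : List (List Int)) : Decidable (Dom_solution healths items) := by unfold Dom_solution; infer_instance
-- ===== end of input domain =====

-- B is an alternative algorithm: items are sorted ONCE by (attack desc, index asc) and each
-- character takes the first affordable item of that preference list, instead of A's full rescan
-- of all items per character.  Both A and B sort `healths` in place (Python side); the equivalence
-- proved here is about the RETURN value.

-- shared accessors: items[j][0] (attack) and items[j][1] (cost); pyGetD is exact under Pre_solution
def itemAtk (items : List (List Int)) (j : Int) : Int :=
  PySem.List.pyGetD (PySem.List.pyGetD items j []) 0 0
def itemCost (items : List (List Int)) (j : Int) : Int :=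
  PySem.List.pyGetD (PySem.List.pyGetD items j []) 1 0

-- ===== PORT A =====
-- inner loop: for j in range(len(items)): find max-attack usable unchecked item (first index on ties)
def innerA (items : List (List Int)) (checked : List Bool) (h : Int) : Int × Int :=
  (PySem.List.pyRange 0 (PySem.List.len items) 1).foldl
    (fun mm j =>
      if h - itemCost items j ≥ 100 ∧ PySem.List.pyGetD checked j false = false then
        if itemAtk items j > mm.1 then (itemAtk items j, j) else mm
      else mm)
    (0, -1)

-- body of A's outer loop: mark the chosen item and append its 1-based index
def stepA (items : List (List Int)) (st : List Bool × List Int) (h : Int) : List Bool × List Int :=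
  let mm := innerA items st.1 h
  if mm.2 ≠ -1 then (PySem.List.pySetD st.1 mm.2 true, st.2 ++ [mm.2 + 1]) else st

def solution (healths : List Int) (items : List (List Int)) : List Int :=
  let hs := PySem.List.sorted healths (fun x => x)
  let st := (PySem.List.pyRange 0 (PySem.List.len hs) 1).foldl
      (fun st i => stepA items st (PySem.List.pyGetD hs i 0))
      (List.replicate items.length false, [])
  PySem.List.sorted st.2 (fun x => x)

-- ===== PORT B =====
-- indices of items with positive attack, sorted by key (-attack, index)
def orderB (items : List (List Int)) : List Int :=
  PySem.List.sorted2
    ((PySem.List.pyRange 0 (PySem.List.len items) 1).filter (fun i => decide (itemAtk items i > 0)))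
    (fun i => -(itemAtk items i)) (fun i => i)

-- Source B's inner loop: first affordable (cost, index) pair, deleted from the remaining list
def pickB (h : Int) : List (Int × Int) → Option (Int × List (Int × Int))
  | [] => none
  | (cost, i) :: rest =>
    if h - cost ≥ 100 then some (i, rest)
    else
      match pickB h rest with
      | some (j, rest') => some (j, (cost, i) :: rest')
      | none => none

def stepB (st : List (Int × Int) × List Int) (h : Int) : List (Int × Int) × List Int :=
  match pickB h st.1 with
  | some (i, rem') => (rem', st.2 ++ [i + 1])
  | none => st

def solution_alt (healths : List Int) (items : List (List Int)) : List Int :=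
  let hs := PySem.List.sorted healths (fun x => x)
  let remaining := (orderB items).map (fun i => (itemCost items i, i))
  let st := hs.foldl stepB (remaining, [])
  PySem.List.sorted st.2 (fun x => x)

-- ===== PRECONDITION & SPEC =====
-- Pre_ excludes inputs where some item list has fewer than 2 entries: Python A raises IndexError
-- on them whenever `healths` is nonempty, and B (which inspects every item up front) raises even
-- for empty `healths`, where A happens to return [] without ever touching `items`.
def Pre_solution (healths : List Int) (items : List (List Int)) : Prop :=
  ∀ it ∈ items, 2 ≤ it.length
instance (healths : List Int) (items : List (List Int)) : Decidable (Pre_solution healths items) := by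
  unfold Pre_solution; infer_instance

def pvWitness_solution : List Int × List (List Int) := ([200, 120], [[5, 10], [7, 150]])

def Spec_solution (healths : List Int) (items : List (List Int)) (out : List Int) : Prop := out = solution_alt healths items
instance (healths : List Int) (items : List (List Int)) (out : List Int) : Decidable (Spec_solution healths items out) := by unfold Spec_solution; infer_instance

-- ===== CLAIM (what is proved, stated in full; the proofs are below) =====
def Claim_equal_solution : Prop := ∀ (healths : List Int) (items : List (List Int)), Dom_solution healths items → Pre_solution healths items → Spec_solution healths items (solution healths items)

-- ===== LEMMAS AND PROOFS =====

-- the remaining preference list B would hold when the items marked in `checked` are gone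
def remOf (items : List (List Int)) (checked : List Bool) : List (Int × Int) :=
  ((orderB items).filter (fun j => !PySem.List.pyGetD checked j false)).map
    (fun i => (itemCost items i, i))

-- the preference order relation orderB is sorted by
def prefR (items : List (List Int)) (a b : Int) : Prop :=
  itemAtk items b < itemAtk items a ∨ (itemAtk items a = itemAtk items b ∧ a ≤ b)

theorem prefR_trans (items : List (List Int)) {a b c : Int} (hab : prefR items a b)
    (hbc : prefR items b c) : prefR items a c := by
  unfold prefR at *; omega

-- insertion with insertBy keeps a transitive total order pairwise (no PySem lemma covers sorted2's order)
theorem pairwise_insertBy {α : Type} {R : α → α → Prop}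
    (htrans : ∀ a b c, R a b → R b c → R a c)
    (before : α → α → Bool) (hf : ∀ a b, before a b = false → R b a)
    (ht : ∀ a b, before a b = true → R a b) (x : α) :
    ∀ {l : List α}, l.Pairwise R → (PySem.List.insertBy before x l).Pairwise R := by
  intro l
  induction l with
  | nil => intro _; simp [PySem.List.insertBy]
  | cons y ys ih =>
    intro hp
    rw [List.pairwise_cons] at hp
    obtain ⟨hy, hys⟩ := hp
    show ((if before x y = true then x :: y :: ys else y :: PySem.List.insertBy before x ys)).Pairwise R
    split_ifs with hb
    · refine List.Pairwise.cons ?_ (List.Pairwise.cons hy hys)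
      intro z hz
      cases hz with
      | head => exact ht _ _ hb
      | tail _ hz => exact htrans _ _ _ (ht _ _ hb) (hy _ hz)
    · refine List.Pairwise.cons ?_ (ih hys)
      intro z hz
      rw [PySem.List.mem_insertBy] at hz
      rcases hz with rfl | hz
      · exact hf _ _ (by simpa using hb)
      · exact hy _ hz

theorem pairwise_foldl_insertBy {α : Type} {R : α → α → Prop}
    (htrans : ∀ a b c, R a b → R b c → R a c)
    (before : α → α → Bool) (hf : ∀ a b, before a b = false → R b a)
    (ht : ∀ a b, before a b = true → R a b) :
    ∀ (xs acc : List α), acc.Pairwise R →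
      (xs.foldl (fun acc x => PySem.List.insertBy before x acc) acc).Pairwise R := by
  intro xs
  induction xs with
  | nil => intro acc h; simpa using h
  | cons x xs ih =>
    intro acc h
    exact ih _ (pairwise_insertBy htrans before hf ht x h)

theorem orderB_pairwise (items : List (List Int)) : (orderB items).Pairwise (prefR items) := by
  have heq : orderB items
      = ((PySem.List.pyRange 0 (PySem.List.len items) 1).filter
          (fun i => decide (itemAtk items i > 0))).foldl
        (fun acc x => PySem.List.insertBy
          (fun a b => decide (-(itemAtk items a) < -(itemAtk items b))
            || (!decide (-(itemAtk items b) < -(itemAtk items a)) && decide (a < b))) x acc) [] := rfl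
  rw [heq]
  refine pairwise_foldl_insertBy (R := prefR items) (fun a b c h1 h2 => prefR_trans items h1 h2)
    (before := fun a b => decide (-(itemAtk items a) < -(itemAtk items b))
      || (!decide (-(itemAtk items b) < -(itemAtk items a)) && decide (a < b))) ?_ ?_ _ [] (by simp)
  · intro a b hb
    simp only [Bool.or_eq_false_iff, Bool.and_eq_false_iff, decide_eq_false_iff_not,
      Bool.not_eq_false', decide_eq_true_eq, not_lt] at hb
    unfold prefR
    omega
  · intro a b hb
    simp only [Bool.or_eq_true, Bool.and_eq_true, Bool.not_eq_true', decide_eq_false_iff_not,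
      decide_eq_true_eq, not_lt] at hb
    unfold prefR
    omega

theorem mem_orderB (items : List (List Int)) (j : Int) :
    j ∈ orderB items ↔ 0 ≤ j ∧ j < items.length ∧ 0 < itemAtk items j := by
  unfold orderB
  rw [(PySem.List.sorted2_perm _ _ _ _).mem_iff]
  simp only [List.mem_filter, PySem.List.mem_pyRange_one, PySem.List.len, decide_eq_true_eq,
    gt_iff_lt]
  tauto

theorem orderB_nodup (items : List (List Int)) : (orderB items).Nodup := by
  unfold orderB
  rw [(PySem.List.sorted2_perm _ _ _ _).nodup_iff]
  exact (PySem.List.nodup_pyRange_one _ _).filter _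

-- A's inner fold, parameterised by how many item indices have been scanned (proof helper)
def scanm (items : List (List Int)) (checked : List Bool) (h : Int) (m : Nat) : Int × Int :=
  (PySem.List.pyRange 0 (m : Int) 1).foldl
    (fun mm j =>
      if h - itemCost items j ≥ 100 ∧ PySem.List.pyGetD checked j false = false then
        if itemAtk items j > mm.1 then (itemAtk items j, j) else mm
      else mm)
    (0, -1)

theorem innerA_eq_scanm (items : List (List Int)) (checked : List Bool) (h : Int) :
    innerA items checked h = scanm items checked h items.length := rfl

-- characterisation of A's inner argmax scan over the first m item indices
theorem innerA_inv (items : List (List Int)) (checked : List Bool) (h : Int) (m : Nat) :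
    (scanm items checked h m = (0, -1) ∧ ∀ j : Int, 0 ≤ j → j < m →
        (h - itemCost items j ≥ 100 ∧ PySem.List.pyGetD checked j false = false) →
        itemAtk items j ≤ 0)
    ∨ (0 ≤ (scanm items checked h m).2 ∧ (scanm items checked h m).2 < m
        ∧ (h - itemCost items (scanm items checked h m).2 ≥ 100
            ∧ PySem.List.pyGetD checked (scanm items checked h m).2 false = false)
        ∧ itemAtk items (scanm items checked h m).2 = (scanm items checked h m).1
        ∧ 0 < (scanm items checked h m).1
        ∧ (∀ j : Int, 0 ≤ j → j < m →
            (h - itemCost items j ≥ 100 ∧ PySem.List.pyGetD checked j false = false) →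
            itemAtk items j ≤ (scanm items checked h m).1)
        ∧ (∀ j : Int, 0 ≤ j → j < m →
            (h - itemCost items j ≥ 100 ∧ PySem.List.pyGetD checked j false = false) →
            itemAtk items j = (scanm items checked h m).1 → (scanm items checked h m).2 ≤ j)) := by
  induction m with
  | zero =>
    left
    constructor
    · unfold scanm
      norm_num [PySem.List.pyRange_one_eq_nil]
    · intro j h0 h1 _
      norm_num at h1
      omega
  | succ m ih =>
    have hr : scanm items checked h (m + 1)
        = (if h - itemCost items (m : Int) ≥ 100
              ∧ PySem.List.pyGetD checked (m : Int) false = false then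
            if itemAtk items (m : Int) > (scanm items checked h m).1 then
              (itemAtk items (m : Int), (m : Int))
            else scanm items checked h m
          else scanm items checked h m) := by
      unfold scanm
      have : ((m + 1 : Nat) : Int) = (m : Int) + 1 := by push_cast; ring
      rw [this, PySem.List.pyRange_one_succ_right (by positivity), List.foldl_append]
      rfl
    by_cases hPm : h - itemCost items (m : Int) ≥ 100
        ∧ PySem.List.pyGetD checked (m : Int) false = false
    · rcases ih with ⟨hpr, hall⟩ | ⟨h0, h1, hP, hV, hpos, hmax, htie⟩
      · -- nothing eligible so far; index m decides
        by_cases hgt : itemAtk items (m : Int) > (scanm items checked h m).1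
        · right
          rw [hr, if_pos hPm, if_pos hgt]
          have hz : (scanm items checked h m).1 = 0 := by rw [hpr]
          refine ⟨by positivity, by push_cast; omega, by simpa using hPm, rfl, by omega, ?_, ?_⟩
          · intro j hj0 hj1 hPj
            by_cases hjm : j < (m : Int)
            · have := hall j hj0 hjm hPj
              omega
            · have : j = (m : Int) := by push_cast at hj1; omega
              simp [this]
          · intro j hj0 hj1 hPj hVj
            by_cases hjm : j < (m : Int)
            · have := hall j hj0 hjm hPj
              omega
            · push_cast at hj1; omega
        · left
          rw [hr, if_pos hPm, if_neg hgt]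
          refine ⟨hpr, ?_⟩
          intro j hj0 hj1 hPj
          by_cases hjm : j < (m : Int)
          · exact hall j hj0 hjm hPj
          · have : j = (m : Int) := by push_cast at hj1; omega
            rw [this]
            have hz : (scanm items checked h m).1 = 0 := by rw [hpr]
            omega
      · -- a best item exists among the first m
        right
        by_cases hgt : itemAtk items (m : Int) > (scanm items checked h m).1
        · rw [hr, if_pos hPm, if_pos hgt]
          refine ⟨by positivity, by push_cast; omega, by simpa using hPm, rfl, by omega, ?_, ?_⟩
          · intro j hj0 hj1 hPj
            by_cases hjm : j < (m : Int)
            · have := hmax j hj0 hjm hPj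
              omega
            · have : j = (m : Int) := by push_cast at hj1; omega
              simp [this]
          · intro j hj0 hj1 hPj hVj
            by_cases hjm : j < (m : Int)
            · have := hmax j hj0 hjm hPj
              omega
            · push_cast at hj1; omega
        · rw [hr, if_pos hPm, if_neg hgt]
          refine ⟨h0, by push_cast; omega, hP, hV, hpos, ?_, ?_⟩
          · intro j hj0 hj1 hPj
            by_cases hjm : j < (m : Int)
            · exact hmax j hj0 hjm hPj
            · have : j = (m : Int) := by push_cast at hj1; omega
              rw [this]; omega
          · intro j hj0 hj1 hPj hVj
            by_cases hjm : j < (m : Int)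
            · exact htie j hj0 hjm hPj hVj
            · have : j = (m : Int) := by push_cast at hj1; omega
              omega
    · rcases ih with ⟨hpr, hall⟩ | ⟨h0, h1, hP, hV, hpos, hmax, htie⟩
      · left
        rw [hr, if_neg hPm]
        refine ⟨hpr, ?_⟩
        intro j hj0 hj1 hPj
        by_cases hjm : j < (m : Int)
        · exact hall j hj0 hjm hPj
        · have : j = (m : Int) := by push_cast at hj1; omega
          rw [this] at hPj
          exact absurd hPj hPm
      · right
        rw [hr, if_neg hPm]
        refine ⟨h0, by push_cast; omega, hP, hV, hpos, ?_, ?_⟩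
        · intro j hj0 hj1 hPj
          by_cases hjm : j < (m : Int)
          · exact hmax j hj0 hjm hPj
          · have : j = (m : Int) := by push_cast at hj1; omega
            rw [this] at hPj
            exact absurd hPj hPm
        · intro j hj0 hj1 hPj hVj
          by_cases hjm : j < (m : Int)
          · exact htie j hj0 hjm hPj hVj
          · have : j = (m : Int) := by push_cast at hj1; omega
            rw [this] at hPj
            exact absurd hPj hPm

-- Source B's scan over a mapped index list: either nothing is affordable, or the first affordable
-- index is removed and everything else kept in order
theorem pickB_spec (items : List (List Int)) (h : Int) (L : List Int) :
    (pickB h (L.map (fun i => (itemCost items i, i))) = none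
        ∧ ∀ j ∈ L, ¬(h - itemCost items j ≥ 100))
    ∨ (∃ L1 j L2, L = L1 ++ j :: L2
        ∧ (∀ j' ∈ L1, ¬(h - itemCost items j' ≥ 100)) ∧ h - itemCost items j ≥ 100
        ∧ pickB h (L.map (fun i => (itemCost items i, i)))
            = some (j, (L1 ++ L2).map (fun i => (itemCost items i, i)))) := by
  induction L with
  | nil => exact Or.inl ⟨rfl, by simp⟩
  | cons i L ih =>
    by_cases hc : h - itemCost items i ≥ 100
    · right
      exact ⟨[], i, L, rfl, by simp, hc, by simp [pickB, hc]⟩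
    · rcases ih with ⟨hnone, hall⟩ | ⟨L1, j, L2, hL, h1, h2, hpick⟩
      · left
        refine ⟨by simp [pickB, hc, hnone], ?_⟩
        intro j hj
        rcases List.mem_cons.mp hj with rfl | hj
        · exact hc
        · exact hall j hj
      · right
        refine ⟨i :: L1, j, L2, by rw [hL]; rfl, ?_, h2, ?_⟩
        · intro j' hj'
          rcases List.mem_cons.mp hj' with rfl | hj'
          · exact hc
          · exact h1 j' hj'
        · simp [pickB, if_neg hc, hpick]

-- the per-character step: A's argmax pick and B's first-affordable pick choose the same item
theorem pick_eq_inner (items : List (List Int)) (checked : List Bool)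
    (hlen : checked.length = items.length) (h : Int) :
    ((innerA items checked h).2 = -1 ∧ pickB h (remOf items checked) = none)
    ∨ (0 ≤ (innerA items checked h).2
        ∧ pickB h (remOf items checked)
            = some ((innerA items checked h).2,
                remOf items (PySem.List.pySetD checked (innerA items checked h).2 true))) := by
  have inv := innerA_inv items checked h items.length
  simp only [innerA_eq_scanm]
  have hmemL : ∀ x : Int,
      x ∈ (orderB items).filter (fun j => !PySem.List.pyGetD checked j false)
        ↔ x ∈ orderB items ∧ PySem.List.pyGetD checked x false = false := by
    intro x; simp [List.mem_filter]
  rcases pickB_spec items h ((orderB items).filter (fun j => !PySem.List.pyGetD checked j false))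
    with ⟨hnone, hall⟩ | ⟨L1, j, L2, hL, hfail, hok, hpick⟩
  · rcases inv with ⟨hz, _⟩ | ⟨h0, h1', hP, hV, hpos, _, _⟩
    · left
      exact ⟨by rw [hz], hnone⟩
    · -- impossible: A found an item but B found none affordable
      exfalso
      have hmem : (scanm items checked h items.length).2
          ∈ (orderB items).filter (fun j => !PySem.List.pyGetD checked j false) := by
        rw [hmemL]
        exact ⟨(mem_orderB items _).mpr ⟨h0, h1', by omega⟩, hP.2⟩
      exact hall _ hmem hP.1
  · rcases inv with ⟨_, hzall⟩ | ⟨h0, h1', hP, hV, hpos, hmax, htie⟩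
    · -- impossible: B found an affordable item but A found none
      exfalso
      have hjL : j ∈ (orderB items).filter (fun j => !PySem.List.pyGetD checked j false) := by
        rw [hL]; exact List.mem_append.mpr (Or.inr (List.mem_cons_self))
      obtain ⟨hjo, hjav⟩ := (hmemL j).mp hjL
      obtain ⟨hj0, hj1, hjatk⟩ := (mem_orderB items j).mp hjo
      have := hzall j hj0 hj1 ⟨hok, hjav⟩
      omega
    · -- both found: they found the same item
      right
      have hmi0 := h0
      have hnodupL : ((orderB items).filter (fun j => !PySem.List.pyGetD checked j false)).Nodup :=
        (orderB_nodup items).filter _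
      have hpairL : ((orderB items).filter
            (fun j => !PySem.List.pyGetD checked j false)).Pairwise (prefR items) :=
        (orderB_pairwise items).sublist List.filter_sublist
      have hmimem : (scanm items checked h items.length).2
          ∈ (orderB items).filter (fun j => !PySem.List.pyGetD checked j false) := by
        rw [hmemL]
        exact ⟨(mem_orderB items _).mpr ⟨h0, h1', by omega⟩, hP.2⟩
      have hjL : j ∈ (orderB items).filter (fun j => !PySem.List.pyGetD checked j false) := by
        rw [hL]; exact List.mem_append.mpr (Or.inr (List.mem_cons_self))
      obtain ⟨hjo, hjav⟩ := (hmemL j).mp hjL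
      obtain ⟨hj0, hj1, hjatk⟩ := (mem_orderB items j).mp hjo
      -- j equals A's choice mi
      have hjeq : j = (scanm items checked h items.length).2 := by
        rw [hL] at hmimem
        rcases List.mem_append.mp hmimem with hmi1 | hmi2
        · exact absurd hP.1 (hfail _ hmi1)
        · rcases List.mem_cons.mp hmi2 with heq | hmi2
          · exact heq.symm
          · -- mi strictly after j in preference order: contradicts A's maximality / tie rule
            have hRjmi : prefR items j (scanm items checked h items.length).2 := by
              rw [hL] at hpairL
              have := (List.pairwise_append.mp hpairL).2.1
              exact (List.pairwise_cons.mp this).1 _ hmi2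
            have hle := hmax j hj0 hj1 ⟨hok, hjav⟩
            have heq : j = (scanm items checked h items.length).2 := by
              unfold prefR at hRjmi
              rcases hRjmi with hlt | ⟨heq2, hle2⟩
              · omega
              · have := htie j hj0 hj1 ⟨hok, hjav⟩ (by omega)
                omega
            -- but then j would occur twice, contradicting nodup
            exfalso
            rw [hL] at hnodupL
            have := (List.nodup_append.mp hnodupL).2.1
            rw [List.nodup_cons] at this
            rw [← heq] at hmi2
            exact this.1 hmi2
      refine ⟨h0, ?_⟩
      have hpick' : pickB h (remOf items checked)
          = some (j, (L1 ++ L2).map (fun i => (itemCost items i, i))) := hpick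
      rw [hpick']
      -- the remaining list after removing the chosen item
      have hlt : (scanm items checked h items.length).2.toNat < checked.length := by
        rw [hlen]; omega
      have hset : ∀ x : Int, 0 ≤ x →
          PySem.List.pyGetD
              (PySem.List.pySetD checked (scanm items checked h items.length).2 true) x false
            = if x = (scanm items checked h items.length).2 then true
              else PySem.List.pyGetD checked x false := by
        intro x hx
        have hg := PySem.List.pyGetD_pySetD_natCast checked
          (scanm items checked h items.length).2.toNat x.toNat true false hlt
        rw [Int.toNat_of_nonneg h0, Int.toNat_of_nonneg hx] at hg
        rw [hg]
        have hiff : (x.toNat = (scanm items checked h items.length).2.toNat) ↔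
            (x = (scanm items checked h items.length).2) := by omega
        exact if_congr hiff rfl rfl
      have hmi_notin : (scanm items checked h items.length).2 ∉ L1
          ∧ (scanm items checked h items.length).2 ∉ L2 := by
        rw [hL] at hnodupL
        obtain ⟨_, hnd2, hdisj⟩ := List.nodup_append.mp hnodupL
        rw [List.nodup_cons] at hnd2
        constructor
        · intro hin
          exact (hdisj _ hin _ List.mem_cons_self) (by rw [hjeq])
        · rw [← hjeq]
          exact hnd2.1
      have hfilt : remOf items
            (PySem.List.pySetD checked (scanm items checked h items.length).2 true)
          = (L1 ++ L2).map (fun i => (itemCost items i, i)) := by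
        unfold remOf
        congr 1
        have hcong : (orderB items).filter (fun x =>
              !PySem.List.pyGetD
                (PySem.List.pySetD checked (scanm items checked h items.length).2 true) x false)
            = (orderB items).filter (fun x =>
                decide (x ≠ (scanm items checked h items.length).2)
                  && !PySem.List.pyGetD checked x false) := by
          apply List.filter_congr
          intro x hx
          have hx0 : 0 ≤ x := ((mem_orderB items x).mp hx).1
          rw [hset x hx0]
          by_cases hxm : x = (scanm items checked h items.length).2
          · simp [hxm]
          · simp [hxm]
        rw [hcong, ← List.filter_filter, hL, hjeq]
        rw [List.filter_append, List.filter_cons]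
        have hh1 : List.filter (fun x => decide (x ≠ (scanm items checked h items.length).2)) L1
            = L1 :=
          List.filter_eq_self.mpr (fun a ha => by
            simp only [decide_eq_true_eq]
            intro hcon
            exact hmi_notin.1 (hcon ▸ ha))
        have hh2 : List.filter (fun x => decide (x ≠ (scanm items checked h items.length).2)) L2
            = L2 :=
          List.filter_eq_self.mpr (fun a ha => by
            simp only [decide_eq_true_eq]
            intro hcon
            exact hmi_notin.2 (hcon ▸ ha))
        rw [hh1, hh2]
        simp
      rw [hfilt, hjeq]

theorem outer (items : List (List Int)) (hs : List Int) :
    ∀ (checked : List Bool) (ans : List Int), checked.length = items.length →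
      (hs.foldl stepB (remOf items checked, ans)).2
        = (hs.foldl (stepA items) (checked, ans)).2 := by
  induction hs with
  | nil => intro checked ans _; rfl
  | cons h hs ih =>
    intro checked ans hlen
    simp only [List.foldl_cons]
    rcases pick_eq_inner items checked hlen h with ⟨hmi, hnone⟩ | ⟨hge, hsome⟩
    · have hA : stepA items (checked, ans) h = (checked, ans) := by
        dsimp only [stepA]
        rw [if_neg (not_not_intro hmi)]
      have hB : stepB (remOf items checked, ans) h = (remOf items checked, ans) := by
        unfold stepB
        rw [hnone]
      rw [hA, hB]
      exact ih checked ans hlen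
    · have hA : stepA items (checked, ans) h
          = (PySem.List.pySetD checked (innerA items checked h).2 true,
              ans ++ [(innerA items checked h).2 + 1]) := by
        dsimp only [stepA]
        rw [if_pos (by omega)]
      have hB : stepB (remOf items checked, ans) h
          = (remOf items (PySem.List.pySetD checked (innerA items checked h).2 true),
              ans ++ [(innerA items checked h).2 + 1]) := by
        unfold stepB
        rw [hsome]
      rw [hA, hB]
      exact ih _ _ (by rw [PySem.List.length_pySetD]; exact hlen)

theorem replicate_avail (n : Nat) (a : Int) :
    PySem.List.pyGetD (List.replicate n false) a false = false := by
  rcases ho : PySem.List.pyGet? (List.replicate n false) a with _ | b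
  · simp [PySem.List.pyGetD, ho]
  · have := PySem.List.mem_of_pyGet?_eq_some _ ho
    simp only [List.mem_replicate] at this
    simp [PySem.List.pyGetD, ho, this.2]

theorem remOf_replicate (items : List (List Int)) :
    remOf items (List.replicate items.length false)
      = (orderB items).map (fun i => (itemCost items i, i)) := by
  unfold remOf
  congr 1
  apply List.filter_eq_self.mpr
  intro a _
  rw [replicate_avail]
  rfl

-- ===== VERDICT (by name: the statement is the Claim_ definition above) =====
theorem solution_spec : Claim_equal_solution := by
  intro healths items _ _
  unfold Spec_solution solution solution_alt
  dsimp only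
  rw [PySem.List.foldl_pyRange_pyGetD (PySem.List.sorted healths (fun x => x)) 0
    (stepA items) (List.replicate items.length false, []) le_rfl]
  rw [Int.toNat_zero, List.drop_zero, ← remOf_replicate items]
  rw [outer items (PySem.List.sorted healths (fun x => x))
    (List.replicate items.length false) [] (by simp)]
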